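-- pv_equiv track=rewrite | github.com/henrypj/codefights | Intro/DarkWilderness/bishopAndPawn.py | bishopAndPawn
-- ===== SOURCE A (Python) =====
-- def bishopAndPawn(bishop, pawn):
--     possibleCells = []
--     bishopCol = bishop[0]
--     bishopRow = bishop[1]
--     rows = "12345678"
--     cols = "abcdefgh"
--     bishopColIdx = cols.find(bishopCol)
--     colsLeft = cols[:bishopColIdx][::-1]
--     colsRight = cols[bishopColIdx+1:]
--     bishopRowIdx = rows.find(bishopRow)
--     rowsDown = rows[:bishopRowIdx][::-1]
--     rowsUp = rows[bishopRowIdx+1:]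
--
--     for i in range(min(len(colsLeft), len(rowsDown))):
--         possibleCells.append(colsLeft[i] + rowsDown[i])
--     for i in range(min(len(colsLeft), len(rowsUp))):
--         possibleCells.append(colsLeft[i] + rowsUp[i])
--     for i in range(min(len(colsRight),len(rowsUp))):
--         possibleCells.append(colsRight[i] + rowsUp[i])
--     for i in range(min(len(colsRight), len(rowsDown))):
--         possibleCells.append(colsRight[i] + rowsDown[i])
--
--     return True if pawn in possibleCells else False
-- ===== SOURCE B (Python) =====
-- def bishopAndPawn(bishop, pawn):
--     cols = "abcdefgh"
--     rows = "12345678"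
--     bc = cols.find(bishop[0])
--     br = rows.find(bishop[1])
--     if len(pawn) != 2:
--         return False
--     pc = cols.find(pawn[0])
--     pr = rows.find(pawn[1])
--     if bc < 0 or br < 0 or pc < 0 or pr < 0:
--         return False
--     colDiff = pc - bc
--     rowDiff = pr - br
--     return colDiff != 0 and abs(colDiff) == abs(rowDiff)
-- ===== Notes on version B (the rewrite author's own statement) =====
-- stated objective: simpler
-- what changed: B replaces A's four diagonal-ray enumeration loops and list-membership scan with a constant-time arithmetic check: look up the four coordinates with .find, reject off-board squares, and test colDiff != 0 and abs(colDiff) == abs(rowDiff).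
-- intended difference: When a bishop coordinate is off the board (bishop[0] not in 'a'-'h' or bishop[1] not in '1'-'8'), A's .find returns -1, its slices wrap, and A returns True for certain on-board pawns (index distances m = n or m + n = 8, e.g. A('z1','a2') is True) as if the off-board bishop attacked them from the board edge; B returns False there, the intended value since an off-board bishop attacks nothing. — e.g. on bishopAndPawn("z1", "a2"): A returns true, B returns false
import Mathlib
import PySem

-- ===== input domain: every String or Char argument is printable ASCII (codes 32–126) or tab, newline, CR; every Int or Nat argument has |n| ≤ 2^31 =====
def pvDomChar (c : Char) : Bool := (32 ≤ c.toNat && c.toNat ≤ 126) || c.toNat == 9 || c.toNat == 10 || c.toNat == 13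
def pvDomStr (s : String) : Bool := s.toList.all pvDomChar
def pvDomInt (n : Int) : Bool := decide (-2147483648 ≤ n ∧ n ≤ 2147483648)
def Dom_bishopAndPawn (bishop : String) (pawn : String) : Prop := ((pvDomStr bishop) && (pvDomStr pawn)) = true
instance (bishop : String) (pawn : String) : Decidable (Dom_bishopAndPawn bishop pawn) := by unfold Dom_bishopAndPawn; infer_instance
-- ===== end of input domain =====

-- B replaces A's four diagonal-ray building loops and list-membership test by a
-- constant-time same-diagonal arithmetic check (objective: simpler); for an
-- off-board bishop coordinate B returns False where A's wrapped slices can say True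
-- (stated as the intended difference D_ below).  Return values only; no mutation.

-- ===== PORT A =====
-- the column/row indices of a square's two characters (cols.find / rows.find)
def sqIdx (c r : Char) : Int × Int :=
  (PySem.Chars.find "abcdefgh".toList [c], PySem.Chars.find "12345678".toList [r])

-- A-side helper: the body of A between the two slices and the four append loops,
-- as a function of the two find indices (the loops are folds over pyRange).
def buildCellsA (bishopColIdx bishopRowIdx : Int) : List (List Char) :=
  let rows := "12345678".toList
  let cols := "abcdefgh".toList
  let colsLeft := (PySem.List.slice cols none (some bishopColIdx)).reverse   -- cols[:i][::-1]
  let colsRight := PySem.List.slice cols (some (bishopColIdx + 1)) none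
  let rowsDown := (PySem.List.slice rows none (some bishopRowIdx)).reverse   -- rows[:i][::-1]
  let rowsUp := PySem.List.slice rows (some (bishopRowIdx + 1)) none
  let possibleCells : List (List Char) := []
  -- indices produced by range(min(...)) are always in range, so pyGetD is exact here
  let possibleCells := (PySem.List.pyRange 0 ((min colsLeft.length rowsDown.length : Nat) : Int) 1).foldl
    (fun acc i => acc ++ [[PySem.List.pyGetD colsLeft i ' ', PySem.List.pyGetD rowsDown i ' ']]) possibleCells
  let possibleCells := (PySem.List.pyRange 0 ((min colsLeft.length rowsUp.length : Nat) : Int) 1).foldl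
    (fun acc i => acc ++ [[PySem.List.pyGetD colsLeft i ' ', PySem.List.pyGetD rowsUp i ' ']]) possibleCells
  let possibleCells := (PySem.List.pyRange 0 ((min colsRight.length rowsUp.length : Nat) : Int) 1).foldl
    (fun acc i => acc ++ [[PySem.List.pyGetD colsRight i ' ', PySem.List.pyGetD rowsUp i ' ']]) possibleCells
  let possibleCells := (PySem.List.pyRange 0 ((min colsRight.length rowsDown.length : Nat) : Int) 1).foldl
    (fun acc i => acc ++ [[PySem.List.pyGetD colsRight i ' ', PySem.List.pyGetD rowsDown i ' ']]) possibleCells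
  possibleCells

def bishopAndPawn (bishop : String) (pawn : String) : Bool :=
  -- bishop[0] / bishop[1] raise IndexError on a short string: excluded by Pre_
  match PySem.List.pyGet? bishop.toList 0, PySem.List.pyGet? bishop.toList 1 with
  | some bishopCol, some bishopRow =>
      let bIdx := sqIdx bishopCol bishopRow                -- cols.find(bishopCol), rows.find(bishopRow)
      let possibleCells := buildCellsA bIdx.1 bIdx.2
      if pawn.toList ∈ possibleCells then true else false
  | _, _ => false

-- ===== PORT B =====
def bishopAndPawn_alt (bishop : String) (pawn : String) : Bool :=
  match bishop.toList with                               -- bishop[0]/bishop[1]: IndexError on a short string, excluded by Pre_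
  | b0 :: b1 :: _ =>
      let bc := PySem.Chars.find "abcdefgh".toList [b0]
      let br := PySem.Chars.find "12345678".toList [b1]
      match pawn.toList with                             -- len(pawn) != 2 → False
      | [p0, p1] =>
          let pc := PySem.Chars.find "abcdefgh".toList [p0]
          let pr := PySem.Chars.find "12345678".toList [p1]
          if bc < 0 ∨ br < 0 ∨ pc < 0 ∨ pr < 0 then false
          else
            let colDiff := pc - bc
            let rowDiff := pr - br
            decide (colDiff ≠ 0 ∧ |colDiff| = |rowDiff|)
      | _ => false
  | _ => false

-- ===== PRECONDITION & SPEC =====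
-- Pre_ excludes only the inputs where A raises IndexError (bishop shorter than 2 chars).
def Pre_bishopAndPawn (bishop : String) (pawn : String) : Prop := 2 ≤ bishop.toList.length
instance (bishop : String) (pawn : String) : Decidable (Pre_bishopAndPawn bishop pawn) := by unfold Pre_bishopAndPawn; infer_instance
def pvWitness_bishopAndPawn : String × String := ("c3", "h8")

-- the indices of a square given as a whole string (first two characters)
def sqD (s : String) : Int × Int := sqIdx (s.toList.headD ' ') (s.toList.tail.headD ' ')

-- When a bishop coordinate is off the board (bishop[0] not in 'a'..'h' or bishop[1]
-- not in '1'..'8'), its index is -1, A's slices wrap, and A returns True for the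
-- on-board pawns whose index distances m, n to the bishop satisfy m = n or
-- m + n = 8 (m, n ≠ 0), as if attacked from the board edge; B returns False there,
-- the intended value since an off-board bishop attacks nothing.
def D_bishopAndPawn (bishop : String) (pawn : String) : Prop :=
  let b := sqD bishop
  let p := sqD pawn
  let m := |p.1 - b.1|
  let n := |p.2 - b.2|
  pawn.toList.length = 2 ∧ min b.1 b.2 < 0 ∧ 0 ≤ min p.1 p.2 ∧
  m * n ≠ 0 ∧ (m = n ∨ m + n = 8)
instance (bishop : String) (pawn : String) : Decidable (D_bishopAndPawn bishop pawn) := by unfold D_bishopAndPawn; infer_instance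

def Spec_bishopAndPawn (bishop : String) (pawn : String) (out : Bool) : Prop := ¬ D_bishopAndPawn bishop pawn → out = bishopAndPawn_alt bishop pawn
instance (bishop : String) (pawn : String) (out : Bool) : Decidable (Spec_bishopAndPawn bishop pawn out) := by unfold Spec_bishopAndPawn; infer_instance

def pvDiffWitness_bishopAndPawn : String × String := ("z1", "a2")
def pvDiffWitnessOut_bishopAndPawn : Bool × Bool := (true, false)

-- ===== CLAIM (what is proved, stated in full; the proofs are below) =====
def Claim_unchanged_bishopAndPawn : Prop := ∀ (bishop : String) (pawn : String), Dom_bishopAndPawn bishop pawn → Pre_bishopAndPawn bishop pawn → Spec_bishopAndPawn bishop pawn (bishopAndPawn bishop pawn)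
def Claim_changed_bishopAndPawn : Prop := Dom_bishopAndPawn (pvDiffWitness_bishopAndPawn.1) (pvDiffWitness_bishopAndPawn.2) ∧ Pre_bishopAndPawn (pvDiffWitness_bishopAndPawn.1) (pvDiffWitness_bishopAndPawn.2) ∧ D_bishopAndPawn (pvDiffWitness_bishopAndPawn.1) (pvDiffWitness_bishopAndPawn.2) ∧ bishopAndPawn (pvDiffWitness_bishopAndPawn.1) (pvDiffWitness_bishopAndPawn.2) = pvDiffWitnessOut_bishopAndPawn.1 ∧ bishopAndPawn_alt (pvDiffWitness_bishopAndPawn.1) (pvDiffWitness_bishopAndPawn.2) = pvDiffWitnessOut_bishopAndPawn.2 ∧ pvDiffWitnessOut_bishopAndPawn.1 ≠ pvDiffWitnessOut_bishopAndPawn.2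
def Claim_exact_bishopAndPawn : Prop := ∀ (bishop : String) (pawn : String), Dom_bishopAndPawn bishop pawn → Pre_bishopAndPawn bishop pawn → D_bishopAndPawn bishop pawn → bishopAndPawn bishop pawn ≠ bishopAndPawn_alt bishop pawn

-- ===== LEMMAS AND PROOFS =====

-- the find index of every cell's two characters (decode of a cell back to indices)
def cellsIdx (bc br : Int) : List (Int × Int) :=
  (buildCellsA bc br).map (fun x =>
    (PySem.Chars.find "abcdefgh".toList [x.getD 0 ' '], PySem.Chars.find "12345678".toList [x.getD 1 ' ']))

def R9 : List Int := PySem.List.pyRange (-1) 8 1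

-- the wrapped-ray relation on the two indices (bc < 0 acts as the ray origins 7 and
-- -1, likewise br < 0), i.e. exactly the on-board pawns A's wrapped slices emit.
def dIdxD (bc br pc pr : Int) : Bool :=
  if (bc < 0 ∨ br < 0) ∧ 0 ≤ pc ∧ 0 ≤ pr then
    let cL := if 0 ≤ bc then bc else 7
    let cR := if 0 ≤ bc then bc else -1
    let rD := if 0 ≤ br then br else 7
    let rU := if 0 ≤ br then br else -1
    decide ((pc < cL ∧ pr = rD - (cL - pc)) ∨ (pc < cL ∧ pr = rU + (cL - pc)) ∨
            (pc > cR ∧ pr = rU + (pc - cR)) ∨ (pc > cR ∧ pr = rD - (pc - cR)))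
  else false

-- B's arithmetic check on the four indices (the tail of bishopAndPawn_alt)
def natCheckB (bc br pc pr : Int) : Bool :=
  if bc < 0 ∨ br < 0 ∨ pc < 0 ∨ pr < 0 then false
  else
    let colDiff := pc - bc
    let rowDiff := pr - br
    decide (colDiff ≠ 0 ∧ |colDiff| = |rowDiff|)

lemma find_cols_char (c : Char) : PySem.Chars.find "abcdefgh".toList [c] =
    if c = 'a' then 0 else if c = 'b' then 1 else if c = 'c' then 2 else if c = 'd' then 3
    else if c = 'e' then 4 else if c = 'f' then 5 else if c = 'g' then 6 else if c = 'h' then 7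
    else -1 := by
  simp [PySem.Chars.find, PySem.Chars.find.go, List.isPrefixOf]

lemma find_rows_char (c : Char) : PySem.Chars.find "12345678".toList [c] =
    if c = '1' then 0 else if c = '2' then 1 else if c = '3' then 2 else if c = '4' then 3
    else if c = '5' then 4 else if c = '6' then 5 else if c = '7' then 6 else if c = '8' then 7
    else -1 := by
  simp [PySem.Chars.find, PySem.Chars.find.go, List.isPrefixOf]

lemma find_cols_mem (c : Char) : PySem.Chars.find "abcdefgh".toList [c] ∈ R9 := by
  rw [find_cols_char]; split_ifs <;> decide

lemma find_rows_mem (c : Char) : PySem.Chars.find "12345678".toList [c] ∈ R9 := by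
  rw [find_rows_char]; split_ifs <;> decide

set_option maxHeartbeats 2000000 in
lemma find_cols_inj (c d : Char) (h : PySem.Chars.find "abcdefgh".toList [c] = PySem.Chars.find "abcdefgh".toList [d])
    (h0 : 0 ≤ PySem.Chars.find "abcdefgh".toList [c]) : c = d := by
  rw [find_cols_char c, find_cols_char d] at h; rw [find_cols_char c] at h0
  split_ifs at h h0 <;> first | omega | (subst_vars; rfl)

set_option maxHeartbeats 2000000 in
lemma find_rows_inj (c d : Char) (h : PySem.Chars.find "12345678".toList [c] = PySem.Chars.find "12345678".toList [d])
    (h0 : 0 ≤ PySem.Chars.find "12345678".toList [c]) : c = d := by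
  rw [find_rows_char c, find_rows_char d] at h; rw [find_rows_char c] at h0
  split_ifs at h h0 <;> first | omega | (subst_vars; rfl)

-- every produced cell is two characters of the two boards (so its decode is nonnegative)
lemma cells_shape : ∀ bc ∈ R9, ∀ br ∈ R9, ∀ x ∈ buildCellsA bc br,
    x.length = 2 ∧ 0 ≤ PySem.Chars.find "abcdefgh".toList [x.getD 0 ' ']
      ∧ 0 ≤ PySem.Chars.find "12345678".toList [x.getD 1 ' '] := by
  decide

-- the heart: on the whole finite index space, outside the wrap region the decoded
-- cell list agrees with B's arithmetic, and inside it A says true while B says false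
lemma cellsIdx_key : ∀ bc ∈ R9, ∀ br ∈ R9, ∀ pc ∈ R9, ∀ pr ∈ R9,
    (dIdxD bc br pc pr = false → decide ((pc, pr) ∈ cellsIdx bc br) = natCheckB bc br pc pr)
    ∧ (dIdxD bc br pc pr = true → decide ((pc, pr) ∈ cellsIdx bc br) = true ∧ natCheckB bc br pc pr = false) := by
  decide

lemma mem_cells_iff (bc br : Int) (hbc : bc ∈ R9) (hbr : br ∈ R9) (p0 p1 : Char) :
    ([p0, p1] ∈ buildCellsA bc br) ↔
    ((PySem.Chars.find "abcdefgh".toList [p0], PySem.Chars.find "12345678".toList [p1]) ∈ cellsIdx bc br) := by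
  constructor
  · intro hmem
    exact List.mem_map.mpr ⟨[p0, p1], hmem, rfl⟩
  · intro hmem
    obtain ⟨x, hx, hdec⟩ := List.mem_map.mp hmem
    obtain ⟨hlen, hc0, hc1⟩ := cells_shape bc hbc br hbr x hx
    match x, hlen with
    | [x0, x1], _ =>
      simp only [List.getD, List.getElem?_cons_zero, List.getElem?_cons_succ, Option.getD_some,
        Prod.mk.injEq] at hdec hc0 hc1
      obtain ⟨h0, h1⟩ := hdec
      rw [← find_cols_inj x0 p0 h0 hc0, ← find_rows_inj x1 p1 h1 hc1]
      exact hx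

-- the wrap relation dIdxD, characterised arithmetically on the finite index space
lemma dIdxD_char : ∀ bc ∈ R9, ∀ br ∈ R9, ∀ pc ∈ R9, ∀ pr ∈ R9,
    (dIdxD bc br pc pr = true ↔ (min bc br < 0 ∧ 0 ≤ min pc pr ∧
      |pc - bc| * |pr - br| ≠ 0 ∧ (|pc - bc| = |pr - br| ∨ |pc - bc| + |pr - br| = 8))) := by
  decide

lemma D_reduce (b0 b1 : Char) (rest : List Char) (p0 p1 : Char)
    (bishop pawn : String) (hb : bishop.toList = b0 :: b1 :: rest) (hp : pawn.toList = [p0, p1]) :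
    D_bishopAndPawn bishop pawn ↔ dIdxD (PySem.Chars.find "abcdefgh".toList [b0])
      (PySem.Chars.find "12345678".toList [b1]) (PySem.Chars.find "abcdefgh".toList [p0])
      (PySem.Chars.find "12345678".toList [p1]) = true := by
  unfold D_bishopAndPawn
  rw [dIdxD_char _ (find_cols_mem b0) _ (find_rows_mem b1) _ (find_cols_mem p0)
    _ (find_rows_mem p1)]
  simp only [sqD, sqIdx, hb, hp, List.headD_cons, List.tail_cons]
  constructor
  · exact fun h => h.2
  · exact fun h => ⟨by simp only [List.length_cons, List.length_nil], h⟩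

-- A's value and B's value reduced to the four find indices (pawn of length 2)
lemma reduce_all (b0 b1 : Char) (rest : List Char) (p0 p1 : Char)
    (bishop pawn : String) (hb : bishop.toList = b0 :: b1 :: rest) (hp : pawn.toList = [p0, p1]) :
    bishopAndPawn bishop pawn = decide ((PySem.Chars.find "abcdefgh".toList [p0],
        PySem.Chars.find "12345678".toList [p1]) ∈ cellsIdx (PySem.Chars.find "abcdefgh".toList [b0])
        (PySem.Chars.find "12345678".toList [b1]))
    ∧ bishopAndPawn_alt bishop pawn = natCheckB (PySem.Chars.find "abcdefgh".toList [b0])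
        (PySem.Chars.find "12345678".toList [b1]) (PySem.Chars.find "abcdefgh".toList [p0])
        (PySem.Chars.find "12345678".toList [p1]) := by
  have hg0 : PySem.List.pyGet? (b0 :: b1 :: rest) (0 : Int) = some b0 := by
    simp [PySem.List.pyGet?, PySem.List.pyIdx?]; rw [if_pos (by omega)]; simp
  have hg1 : PySem.List.pyGet? (b0 :: b1 :: rest) (1 : Int) = some b1 := by
    simp [PySem.List.pyGet?, PySem.List.pyIdx?]
  refine ⟨?_, ?_⟩
  · simp only [bishopAndPawn, sqIdx, hb, hg0, hg1, hp]
    have hiff := mem_cells_iff _ _ (find_cols_mem b0) (find_rows_mem b1) p0 p1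
    by_cases hm : [p0, p1] ∈ buildCellsA (PySem.Chars.find "abcdefgh".toList [b0])
        (PySem.Chars.find "12345678".toList [b1])
    · rw [if_pos hm]; exact (decide_eq_true (hiff.mp hm)).symm
    · rw [if_neg hm]; exact (decide_eq_false (fun h => hm (hiff.mpr h))).symm
  · simp only [bishopAndPawn_alt, hb, hp, natCheckB]

lemma pawn_not_two_false (b0 b1 : Char) (rest : List Char) (bishop pawn : String)
    (hb : bishop.toList = b0 :: b1 :: rest) (hp : pawn.toList.length ≠ 2) :
    bishopAndPawn bishop pawn = false ∧ bishopAndPawn_alt bishop pawn = false := by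
  have hg0 : PySem.List.pyGet? (b0 :: b1 :: rest) (0 : Int) = some b0 := by
    simp [PySem.List.pyGet?, PySem.List.pyIdx?]; rw [if_pos (by omega)]; simp
  have hg1 : PySem.List.pyGet? (b0 :: b1 :: rest) (1 : Int) = some b1 := by
    simp [PySem.List.pyGet?, PySem.List.pyIdx?]
  constructor
  · simp only [bishopAndPawn, sqIdx, hb, hg0, hg1]
    have hnm : ¬ (pawn.toList ∈ buildCellsA (PySem.Chars.find "abcdefgh".toList [b0])
        (PySem.Chars.find "12345678".toList [b1])) := by
      intro hmem
      exact hp (cells_shape _ (find_cols_mem b0) _ (find_rows_mem b1) _ hmem).1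
    rw [if_neg hnm]
  · simp only [bishopAndPawn_alt, hb]
    rcases hpl : pawn.toList with _ | ⟨q0, _ | ⟨q1, _ | _⟩⟩ <;> first | rfl | (rw [hpl] at hp; simp at hp)

theorem bishopAndPawn_spec : Claim_unchanged_bishopAndPawn := by
  intro bishop pawn _ hpre hnd
  unfold Pre_bishopAndPawn at hpre
  rcases hb : bishop.toList with _ | ⟨b0, _ | ⟨b1, rest⟩⟩
  · rw [hb] at hpre; simp at hpre
  · rw [hb] at hpre; simp at hpre
  rcases hp2 : decide (pawn.toList.length = 2) with _ | _
  · have := pawn_not_two_false b0 b1 rest bishop pawn hb (by simpa using hp2)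
    rw [this.1, this.2]
  · have hlen : pawn.toList.length = 2 := by simpa using hp2
    rcases hpl : pawn.toList with _ | ⟨p0, _ | ⟨p1, _ | _⟩⟩ <;> rw [hpl] at hlen <;> try simp at hlen
    obtain ⟨hA, hB⟩ := reduce_all b0 b1 rest p0 p1 bishop pawn hb hpl
    have hdF : dIdxD (PySem.Chars.find "abcdefgh".toList [b0]) (PySem.Chars.find "12345678".toList [b1])
        (PySem.Chars.find "abcdefgh".toList [p0]) (PySem.Chars.find "12345678".toList [p1]) = false := by
      cases hEq : dIdxD (PySem.Chars.find "abcdefgh".toList [b0]) (PySem.Chars.find "12345678".toList [b1])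
          (PySem.Chars.find "abcdefgh".toList [p0]) (PySem.Chars.find "12345678".toList [p1]) with
      | false => rfl
      | true => exact absurd ((D_reduce b0 b1 rest p0 p1 bishop pawn hb hpl).mpr hEq) hnd
    rw [hA, hB]
    exact (cellsIdx_key _ (find_cols_mem b0) _ (find_rows_mem b1) _ (find_cols_mem p0)
      _ (find_rows_mem p1)).1 hdF

theorem bishopAndPawn_changed : Claim_changed_bishopAndPawn := by
  unfold Claim_changed_bishopAndPawn; decide

theorem bishopAndPawn_tight : Claim_exact_bishopAndPawn := by
  intro bishop pawn _ hpre hd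
  unfold Pre_bishopAndPawn at hpre
  rcases hb : bishop.toList with _ | ⟨b0, _ | ⟨b1, rest⟩⟩
  · rw [hb] at hpre; simp at hpre
  · rw [hb] at hpre; simp at hpre
  rcases hpl : pawn.toList with _ | ⟨p0, _ | ⟨p1, _ | ⟨p2, ps⟩⟩⟩
  · unfold D_bishopAndPawn at hd; rw [hpl] at hd; simp at hd
  · unfold D_bishopAndPawn at hd; rw [hpl] at hd; simp at hd
  · obtain ⟨hA, hB⟩ := reduce_all b0 b1 rest p0 p1 bishop pawn hb hpl
    have hdT := (D_reduce b0 b1 rest p0 p1 bishop pawn hb hpl).mp hd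
    have hk := (cellsIdx_key _ (find_cols_mem b0) _ (find_rows_mem b1) _ (find_cols_mem p0)
        _ (find_rows_mem p1)).2 hdT
    rw [hA, hB, hk.1, hk.2]; simp
  · unfold D_bishopAndPawn at hd; rw [hpl] at hd; simp at hd
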